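-- pv_equiv track=rewrite | github.com/joseph415/algorithm | python/programmers/dp/1.py | solution
-- ===== SOURCE A (Python) =====
-- def solution(N, number):
--
--     f = [set() for _ in range(10)]
--     concatenate = ''
--
--     for count in range(1, 10):
--         concatenate += str(N)
--         temp = set()
--         temp.add(int(concatenate))
--         for k in range(1, count):
--             for j in f[k]:
--                 for l in f[count - k]:
--                     temp.add(j + l)
--                     temp.add(j - l)
--                     if l != 0:
--                         temp.add(j // l)
--                     temp.add(j * l)
--         f[count] = temp
--         if number in f[count]:
--             break
--     else:
--         return -1
--
--     return count
-- ===== SOURCE B (Python) =====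
-- def solution(N, number):
--     memo = {}
--
--     def reach(k):
--         # set of all values obtainable from exactly k copies of N
--         if k in memo:
--             return memo[k]
--         s = {int(str(N) * k)}
--         for i in range(1, k):
--             left = reach(i)
--             right = reach(k - i)
--             for a in left:
--                 for b in right:
--                     s.add(a + b)
--                     s.add(a - b)
--                     s.add(a * b)
--                     if b != 0:
--                         s.add(a // b)
--         memo[k] = s
--         return s
--
--     for count in range(1, 10):
--         if number in reach(count):
--             return count
--     return -1
-- ===== Notes on version B (the rewrite author's own statement) =====
-- stated objective: alternative
-- what changed: Replaced the bottom-up 10-slot array DP with string accumulator and for-else break by a dict-memoized recursion reach(k) computing the set reachable from exactly k copies of N, with a simple top-level first-match scan.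
import Mathlib
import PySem

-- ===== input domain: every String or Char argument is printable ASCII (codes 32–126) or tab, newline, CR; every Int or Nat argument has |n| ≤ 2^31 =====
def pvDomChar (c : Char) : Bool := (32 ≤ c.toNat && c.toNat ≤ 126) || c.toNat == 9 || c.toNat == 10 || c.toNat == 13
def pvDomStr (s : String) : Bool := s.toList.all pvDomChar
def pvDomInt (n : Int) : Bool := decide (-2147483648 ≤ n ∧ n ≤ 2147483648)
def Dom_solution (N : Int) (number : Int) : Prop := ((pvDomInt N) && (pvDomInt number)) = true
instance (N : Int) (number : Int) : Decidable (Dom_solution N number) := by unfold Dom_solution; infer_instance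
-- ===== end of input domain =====

-- B replaces A's bottom-up array DP (string accumulator, for-else break) with a memoized
-- recursion reach(k) plus a first-match scan; equal return values on Pre_ (elsewhere both raise).
-- Python 'set' is modelled as Std.HashSet Int: both programs consume their sets only
-- order-independently (add, and membership of `number`), so iteration order never matters.

-- ===== PORT A =====
-- the four temp.add calls of A's innermost loop body, in A's order (// guarded by l != 0)
def addCombosA (temp : Std.HashSet Int) (j l : Int) : Std.HashSet Int :=
  let t1 := temp.insert (j + l)
  let t2 := t1.insert (j - l)
  let t3 := if l ≠ 0 then t2.insert (PySem.Int.floordiv j l) else t2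
  t3.insert (j * l)

-- for k in range(1, count): for j in f[k]: for l in f[count-k]: …
def innerLoopA (f : List (Std.HashSet Int)) (count : Nat) (temp : Std.HashSet Int) :
    Std.HashSet Int :=
  (List.range' 1 (count - 1)).foldl (fun temp k =>
    (f.getD k ∅).toList.foldl (fun temp j =>
      (f.getD (count - k) ∅).toList.foldl (fun temp l => addCombosA temp j l) temp)
      temp) temp

-- the for-else loop over count in range(1,10); int(concatenate) ported as (ofStr? _).getD 0:
-- Pre_solution excludes exactly the inputs where that int() raises ValueError in Python.
def loopA (N number : Int) : List Nat → List (Std.HashSet Int) → String → Int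
  | [], _, _ => -1
  | count :: rest, f, concatenate =>
    let concatenate := concatenate ++ PySem.Int.toStr N
    let temp := (∅ : Std.HashSet Int).insert ((PySem.Int.ofStr? concatenate).getD 0)
    let temp := innerLoopA f count temp
    let f := f.set count temp
    if number ∈ temp then (count : Int) else loopA N number rest f concatenate

def solution (N : Int) (number : Int) : Int :=
  loopA N number (List.range' 1 9) (List.replicate 10 ∅) ""

-- ===== PORT B =====
-- str(N) * k: hand port of Python string repetition (exact: k appended copies of str(N))
def repStrB (N : Int) : Nat → String
  | 0 => ""
  | k + 1 => repStrB N k ++ PySem.Int.toStr N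

-- B's four s.add calls, in B's order (a*b before the guarded a//b)
def addCombosB (s : Std.HashSet Int) (a b : Int) : Std.HashSet Int :=
  let s1 := s.insert (a + b)
  let s2 := s1.insert (a - b)
  let s3 := s2.insert (a * b)
  if b ≠ 0 then s3.insert (PySem.Int.floordiv a b) else s3

-- recursion reach(k) (Source B's memo dict is an evaluation cache, not part of the value computed)
def reachB (N : Int) (k : Nat) : Std.HashSet Int :=
  let s0 := (∅ : Std.HashSet Int).insert ((PySem.Int.ofStr? (repStrB N k)).getD 0)
  (List.range' 1 (k - 1)).attach.foldl
    (fun s i =>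
      let left := reachB N i.1
      let right := reachB N (k - i.1)
      left.toList.foldl (fun s a => right.toList.foldl (fun s b => addCombosB s a b) s) s)
    s0
termination_by k
decreasing_by
  · have := List.mem_range'_1.mp i.2; omega
  · have := List.mem_range'_1.mp i.2; omega

-- for count in range(1, 10): if number in reach(count): return count / return -1
def scanB (N number : Int) : List Nat → Int
  | [] => -1
  | c :: rest => if number ∈ reachB N c then (c : Int) else scanB N number rest

def solution_alt (N : Int) (number : Int) : Int :=
  scanB N number (List.range' 1 9)

-- ===== PRECONDITION & SPEC =====
-- Pre_ excludes exactly the inputs where Python A raises ValueError: N < 0 with number ≠ N,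
-- where int("-3-3") on the concatenated string fails at count = 2 (B raises identically there).
def Pre_solution (N : Int) (number : Int) : Prop := 0 ≤ N ∨ number = N
instance (N : Int) (number : Int) : Decidable (Pre_solution N number) := by
  unfold Pre_solution; infer_instance

def pvWitness_solution : Int × Int := (5, 12)

def Spec_solution (N : Int) (number : Int) (out : Int) : Prop := out = solution_alt N number
instance (N : Int) (number : Int) (out : Int) : Decidable (Spec_solution N number out) := by
  unfold Spec_solution; infer_instance

-- ===== CLAIM (what is proved, stated in full; the proofs are below) =====
def Claim_equal_solution : Prop := ∀ (N : Int) (number : Int), Dom_solution N number → Pre_solution N number → Spec_solution N number (solution N number)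

-- ===== LEMMAS AND PROOFS =====

-- one value produced by the innermost body, for either port
def ComboVal (j l x : Int) : Prop :=
  x = j + l ∨ x = j - l ∨ (l ≠ 0 ∧ x = PySem.Int.floordiv j l) ∨ x = j * l

-- some pair of the two sets produces x
def Combo (sa sb : Std.HashSet Int) (x : Int) : Prop :=
  ∃ j ∈ sa, ∃ l ∈ sb, ComboVal j l x

lemma mem_addCombosA (t : Std.HashSet Int) (j l x : Int) :
    x ∈ addCombosA t j l ↔ x ∈ t ∨ ComboVal j l x := by
  unfold addCombosA ComboVal
  split_ifs with h <;> simp [Std.HashSet.mem_insert] <;> tauto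

lemma mem_addCombosB (s : Std.HashSet Int) (a b x : Int) :
    x ∈ addCombosB s a b ↔ x ∈ s ∨ ComboVal a b x := by
  unfold addCombosB ComboVal
  split_ifs with h <;> simp [Std.HashSet.mem_insert] <;> tauto

-- generic membership shape of an accumulating set fold
lemma mem_foldl_iff {β : Type} (g : Std.HashSet Int → β → Std.HashSet Int) (Q : β → Int → Prop)
    (hg : ∀ t y x, x ∈ g t y ↔ x ∈ t ∨ Q y x) :
    ∀ (ys : List β) (t : Std.HashSet Int) (x : Int),
      x ∈ ys.foldl g t ↔ x ∈ t ∨ ∃ y ∈ ys, Q y x := by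
  intro ys
  induction ys with
  | nil => simp
  | cons y ys ih =>
    intro t x
    simp only [List.foldl_cons, ih, hg]
    simp only [List.mem_cons]
    constructor
    · rintro ((h | h) | ⟨y', hy', hq⟩)
      · exact Or.inl h
      · exact Or.inr ⟨y, Or.inl rfl, h⟩
      · exact Or.inr ⟨y', Or.inr hy', hq⟩
    · rintro (h | ⟨y', hy', hq⟩)
      · exact Or.inl (Or.inl h)
      · rcases hy' with rfl | hy'
        · exact Or.inl (Or.inr hq)
        · exact Or.inr ⟨y', hy', hq⟩

lemma mem_innerLoopA (f : List (Std.HashSet Int)) (count : Nat) (temp : Std.HashSet Int)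
    (x : Int) :
    x ∈ innerLoopA f count temp ↔ x ∈ temp ∨
      ∃ k ∈ List.range' 1 (count - 1), Combo (f.getD k ∅) (f.getD (count - k) ∅) x := by
  unfold innerLoopA
  refine mem_foldl_iff _ (fun k x => Combo (f.getD k ∅) (f.getD (count - k) ∅) x)
    (fun t k x => ?_) _ _ _
  rw [mem_foldl_iff _ (fun j x => ∃ l ∈ f.getD (count - k) ∅, ComboVal j l x)
    (fun t j x => by
      rw [mem_foldl_iff _ (fun l x => ComboVal j l x) (fun t l x => mem_addCombosA t j l x)]
      simp only [Std.HashSet.mem_toList]) ]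
  simp only [Std.HashSet.mem_toList]
  rfl

lemma mem_reachB (N : Int) (k : Nat) (x : Int) :
    x ∈ reachB N k ↔ x = (PySem.Int.ofStr? (repStrB N k)).getD 0 ∨
      ∃ i ∈ List.range' 1 (k - 1), Combo (reachB N i) (reachB N (k - i)) x := by
  rw [reachB]
  rw [mem_foldl_iff _ (fun (i : {i // i ∈ List.range' 1 (k - 1)}) x =>
        Combo (reachB N i.1) (reachB N (k - i.1)) x)
      (fun t i x => ?hg)]
  · constructor
    · rintro (h | ⟨⟨i, hi⟩, _, hq⟩)
      · left
        have := by simpa [Std.HashSet.mem_insert] using h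
        exact this.symm
      · exact Or.inr ⟨i, hi, hq⟩
    · rintro (h | ⟨i, hi, hq⟩)
      · left; simp [Std.HashSet.mem_insert, h]

      · exact Or.inr ⟨⟨i, hi⟩, List.mem_attach _ _, hq⟩
  case hg =>
    rw [mem_foldl_iff _ (fun a x => ∃ l ∈ reachB N (k - i.1), ComboVal a l x)
      (fun t a x => by
        rw [mem_foldl_iff _ (fun b x => ComboVal a b x) (fun t b x => mem_addCombosB t a b x)]
        simp only [Std.HashSet.mem_toList])]
    simp only [Std.HashSet.mem_toList]
    rfl

lemma Combo_congr {sa sa' sb sb' : Std.HashSet Int}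
    (ha : ∀ x, x ∈ sa ↔ x ∈ sa') (hb : ∀ x, x ∈ sb ↔ x ∈ sb') (x : Int) :
    Combo sa sb x ↔ Combo sa' sb' x := by
  unfold Combo
  constructor
  · rintro ⟨j, hj, l, hl, h⟩; exact ⟨j, (ha j).mp hj, l, (hb l).mp hl, h⟩
  · rintro ⟨j, hj, l, hl, h⟩; exact ⟨j, (ha j).mpr hj, l, (hb l).mpr hl, h⟩

-- the loop invariant: every already-computed slot of A's f agrees (as a set) with reachB
lemma loopA_eq_scanB (N number : Int) :
    ∀ (n count : Nat) (f : List (Std.HashSet Int)), f.length = 10 → 1 ≤ count →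
      count + n = 10 →
      (∀ i, 1 ≤ i → i < count → ∀ x, x ∈ f.getD i ∅ ↔ x ∈ reachB N i) →
      loopA N number (List.range' count n) f (repStrB N (count - 1)) =
        scanB N number (List.range' count n) := by
  intro n
  induction n with
  | zero => intro count f _ _ _ _; rfl
  | succ n ih =>
    intro count f hlen hc hcn hf
    rw [List.range'_succ]
    have hconcat : repStrB N (count - 1) ++ PySem.Int.toStr N = repStrB N count := by
      have h1 : count - 1 + 1 = count := by omega
      calc repStrB N (count - 1) ++ PySem.Int.toStr N = repStrB N (count - 1 + 1) := rfl
        _ = repStrB N count := by rw [h1]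
    simp only [loopA, scanB, hconcat]
    set temp := innerLoopA f count
        ((∅ : Std.HashSet Int).insert ((PySem.Int.ofStr? (repStrB N count)).getD 0)) with htemp
    have hmem : ∀ x, x ∈ temp ↔ x ∈ reachB N count := by
      intro x
      rw [htemp, mem_innerLoopA, mem_reachB]
      have hseed : x ∈ (∅ : Std.HashSet Int).insert ((PySem.Int.ofStr? (repStrB N count)).getD 0)
          ↔ x = (PySem.Int.ofStr? (repStrB N count)).getD 0 := by
        simp [Std.HashSet.mem_insert]
        tauto
      rw [hseed]
      constructor
      · rintro (h | ⟨k, hk, hq⟩)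
        · exact Or.inl h
        · have hkb := List.mem_range'_1.mp hk
          refine Or.inr ⟨k, hk, ?_⟩
          rw [← Combo_congr (hf k (by omega) (by omega))
            (hf (count - k) (by omega) (by omega))]
          exact hq
      · rintro (h | ⟨k, hk, hq⟩)
        · exact Or.inl h
        · have hkb := List.mem_range'_1.mp hk
          refine Or.inr ⟨k, hk, ?_⟩
          rw [Combo_congr (hf k (by omega) (by omega))
            (hf (count - k) (by omega) (by omega))]
          exact hq
    by_cases hnum : number ∈ temp
    · rw [if_pos hnum, if_pos ((hmem number).mp hnum)]
    · rw [if_neg hnum, if_neg (fun h => hnum ((hmem number).mpr h))]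
      have hgoal := ih (count + 1) (f.set count temp) (by simpa using hlen) (by omega) (by omega)
        ?hf'
      · simpa using hgoal
      case hf' =>
        intro i h1 hi x
        by_cases hic : i = count
        · subst hic
          have : (f.set i temp).getD i ∅ = temp := by
            have : i < (f.set i temp).length := by simp [hlen]; omega
            rw [List.getD_eq_getElem _ _ this]
            simp [List.getElem_set_self (h := this)]
          rw [this]
          exact hmem x
        · have hne : (f.set count temp).getD i ∅ = f.getD i ∅ := by
            have hi10 : i < 10 := by omega
            have h1' : i < (f.set count temp).length := by simp [hlen]; omega
            have h2' : i < f.length := by omega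
            rw [List.getD_eq_getElem _ _ h1', List.getD_eq_getElem _ _ h2']
            exact List.getElem_set_ne (show count ≠ i by omega) _
          rw [hne]
          exact hf i h1 (by omega) x

-- ===== VERDICT (by name: the statement is the Claim_ definition above) =====
theorem solution_spec : Claim_equal_solution := by
  intro N number _ _
  unfold Spec_solution solution solution_alt
  exact loopA_eq_scanB N number 9 1 (List.replicate 10 ∅) (by simp) (by omega)
    (by omega) (fun i h1 hi => by omega)
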